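-- pv_equiv track=rewrite | github.com/ronaldngounou/LeetCode-Practice | 1737-maximum-nesting-depth-of-the-parentheses/1737-maximum-nesting-depth-of-the-parentheses.py | maxDepth
-- ===== SOURCE A (Python) =====
-- def maxDepth(s: str) -> int:
--     depth = 0
--     max_depth = 0
--     for i in range (len(s)):
--         if s[i] == '(':
--             depth += 1
--             max_depth = max(max_depth, depth)
--
--         elif s[i] == ')':
--             depth -= 1
--
--     return max_depth
-- ===== SOURCE B (Python) =====
-- def maxDepth(s: str) -> int:
--     # Divide and conquer: solve(t) returns (balance of t, max nesting depth
--     # reached at any prefix of t). Halves combine by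
--     # (bL+bR, max(pL, bL+pR)) — the right half's depths are offset by the
--     # left half's balance. Correct because prefix depths of t = prefix
--     # depths of its left half, plus left-balance-shifted prefix depths of
--     # the right half.
--     def solve(t):
--         n = len(t)
--         if n <= 1:
--             d = 1 if t == '(' else -1 if t == ')' else 0
--             return (d, max(0, d))
--         m = n // 2
--         bL, pL = solve(t[:m])
--         bR, pR = solve(t[m:])
--         return (bL + bR, max(pL, bL + pR))
--     return solve(s)[1]
-- ===== Notes on version B (the rewrite author's own statement) =====
-- stated objective: alternative
-- what changed: B replaces A's single left-to-right scan maintaining (depth, max_depth) with a divide-and-conquer recursion: split the string in halves, compute (balance, max-prefix-depth) for each half, and merge with (bL+bR, max(pL, bL+pR)).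
import Mathlib
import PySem

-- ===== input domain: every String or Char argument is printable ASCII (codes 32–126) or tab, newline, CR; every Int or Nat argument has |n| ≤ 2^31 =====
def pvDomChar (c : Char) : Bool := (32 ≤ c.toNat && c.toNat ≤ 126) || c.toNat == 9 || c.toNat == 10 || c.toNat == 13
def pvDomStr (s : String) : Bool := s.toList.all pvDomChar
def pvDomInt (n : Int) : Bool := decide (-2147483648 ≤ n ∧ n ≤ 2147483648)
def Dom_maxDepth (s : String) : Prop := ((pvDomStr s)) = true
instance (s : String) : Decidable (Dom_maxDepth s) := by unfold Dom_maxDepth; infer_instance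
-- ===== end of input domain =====

-- B (alternative, not faster): replaces A's single left-to-right scan with a
-- divide-and-conquer recursion combining (balance, max-prefix-depth) of the two halves.


-- ===== PORT A =====
-- A: one left-to-right scan maintaining (depth, max_depth)
def loopA : List Char → Int → Int → Int
  | [], _, m => m
  | c :: cs, depth, m =>
    if c = '(' then loopA cs (depth + 1) (max m (depth + 1))
    else if c = ')' then loopA cs (depth - 1) m
    else loopA cs depth m

def maxDepth (s : String) : Int := loopA s.toList 0 0

-- ===== PORT B =====
-- B: divide and conquer; solve t = (balance of t, max prefix depth of t),
-- halves merged by (bL + bR, max pL (bL + pR))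
def pvDelta (c : Char) : Int := if c = '(' then 1 else if c = ')' then -1 else 0

def pvSolve (l : List Char) : Int × Int :=
  if h : l.length ≤ 1 then
    match l with
    | [] => (0, 0)
    | c :: _ => (pvDelta c, max 0 (pvDelta c))
  else
    let m := l.length / 2  -- Python's len(t)//2: exact, both operands nonnegative
    let L := pvSolve (l.take m)
    let R := pvSolve (l.drop m)
    (L.1 + R.1, max L.2 (L.1 + R.2))
termination_by l.length
decreasing_by
  · simp only [List.length_take]; omega
  · simp only [List.length_drop]; omega

def maxDepth_alt (s : String) : Int := (pvSolve s.toList).2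

-- ===== PRECONDITION & SPEC =====
def Spec_maxDepth (s : String) (out : Int) : Prop := out = maxDepth_alt s
instance (s : String) (out : Int) : Decidable (Spec_maxDepth s out) := by unfold Spec_maxDepth; infer_instance

-- ===== CLAIM (what is proved, stated in full; the proofs are below) =====
def Claim_equal_maxDepth : Prop := ∀ (s : String), Dom_maxDepth s → Spec_maxDepth s (maxDepth s)

-- ===== LEMMAS AND PROOFS =====
-- reference semantics: balance and max-prefix-depth of a character list
def pvBal (l : List Char) : Int := (l.map pvDelta).sum

def pvMp : List Char → Int
  | [] => 0
  | c :: cs => max 0 (pvDelta c + pvMp cs)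

lemma pvMp_nonneg (l : List Char) : 0 ≤ pvMp l := by
  cases l <;> simp [pvMp]

lemma pvMp_append (xs ys : List Char) :
    pvMp (xs ++ ys) = max (pvMp xs) (pvBal xs + pvMp ys) := by
  induction xs with
  | nil =>
      have := pvMp_nonneg ys
      simp [pvMp, pvBal]; omega
  | cons c cs ih =>
      simp only [List.cons_append, pvMp, pvBal, List.map_cons, List.sum_cons, ih]
      have h1 : pvBal cs = (cs.map pvDelta).sum := rfl
      omega

lemma pvBal_append (xs ys : List Char) :
    pvBal (xs ++ ys) = pvBal xs + pvBal ys := by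
  simp [pvBal]

lemma pvSolve_eq (l : List Char) : pvSolve l = (pvBal l, pvMp l) := by
  induction l using pvSolve.induct with
  | case1 h =>
      rw [pvSolve]; simp [pvBal, pvMp]
  | case2 c cs h hlen =>
      rw [pvSolve]
      have : cs = [] := by
        cases cs with
        | nil => rfl
        | cons d ds => simp at hlen
      subst this
      simp [pvBal, pvMp]
  | case3 l h m ih1 ih2 =>
      rw [pvSolve]
      simp only [h, dite_false]
      have e1 := ih1; have e2 := ih2
      simp only [show m = l.length / 2 from rfl] at e1 e2
      rw [e1, e2]
      have hsplit : l.take (l.length / 2) ++ l.drop (l.length / 2) = l :=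
        List.take_append_drop _ _
      rw [Prod.mk.injEq]
      constructor
      · rw [← pvBal_append, hsplit]
      · rw [← pvMp_append, hsplit]

lemma loopA_eq (cs : List Char) (d m : Int) (h : d ≤ m) :
    loopA cs d m = max m (d + pvMp cs) := by
  induction cs generalizing d m with
  | nil => simp [loopA, pvMp]; omega
  | cons c cs ih =>
      have hnn := pvMp_nonneg cs
      simp only [loopA, pvMp, pvDelta]
      split_ifs with h1 h2
      · rw [ih (d + 1) (max m (d + 1)) (le_max_right _ _)]; omega
      · rw [ih (d - 1) m (by omega)]; omega
      · rw [ih d m h]; omega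

-- ===== VERDICT (by name: the statement is the Claim_ definition above) =====
theorem maxDepth_spec : Claim_equal_maxDepth := by
  intro s _
  unfold Spec_maxDepth maxDepth maxDepth_alt
  rw [pvSolve_eq, loopA_eq _ _ _ le_rfl]
  have := pvMp_nonneg s.toList
  simp; omega
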